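-- pv_equiv track=rewrite | github.com/rishavb123/PyEncrypt | rsa.py | calculate_group_by
-- ===== SOURCE A (Python) =====
-- def calculate_group_by(n: int) -> int:
--     """Calculates the group by value for the RSA cipher
--
--     Args:
--         n (int): the RSA modulus
--
--     Returns:
--         int: the group by value
--     """
--     s = 25
--     c = 0
--     while int(s) < n:
--         s *= 100
--         s += 25
--         c += 1
--     return c * 2
-- ===== SOURCE B (Python) =====
-- def calculate_group_by(n: int) -> int:
--     """Digit-count based closed-ish form: find the least block count b with
--     int('25'*b) >= n and return 2*(b-1)."""
--     if n <= 25: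
--         return 0
--     m = 0
--     t = n
--     while t > 0:
--         t //= 10
--         m += 1
--     b = (m + 1) // 2
--     if m % 2 == 0 and 25 * (100 ** b - 1) // 99 < n:
--         b += 1
--     return 2 * (b - 1)
-- ===== Notes on version B (the rewrite author's own statement) =====
-- stated objective: alternative
-- what changed: A repeatedly grows a two-digit-block pattern number until it reaches n; B instead counts the digits of n with a divide-by-ten loop and derives the least block count b whose pattern number reaches n by a parity formula plus one boundary comparison, returning twice b minus one.
import Mathlib
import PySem

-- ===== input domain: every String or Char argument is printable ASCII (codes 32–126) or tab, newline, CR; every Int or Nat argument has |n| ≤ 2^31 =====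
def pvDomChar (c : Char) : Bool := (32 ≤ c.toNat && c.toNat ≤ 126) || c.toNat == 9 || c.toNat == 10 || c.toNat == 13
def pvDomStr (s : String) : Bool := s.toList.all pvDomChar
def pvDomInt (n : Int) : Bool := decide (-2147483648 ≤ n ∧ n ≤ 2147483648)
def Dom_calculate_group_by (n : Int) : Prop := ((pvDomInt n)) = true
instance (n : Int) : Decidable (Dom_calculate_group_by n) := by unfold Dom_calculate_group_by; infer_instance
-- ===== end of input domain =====

-- B replaces A's grow-the-pattern loop by a digit-count loop plus a block-count formula (alternative decomposition, same cost on this domain).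

-- ===== PORT A =====
-- A's while loop: s starts at 25 and only grows, so '0 ≤ s' is a pure totality
-- guard (always true on every reachable call); it only makes the measure work.
def pvLoopA (n s c : Int) : Int :=
  if s < n ∧ 0 ≤ s then pvLoopA n (s * 100 + 25) (c + 1) else c * 2
termination_by (n - s).toNat
decreasing_by omega

def calculate_group_by (n : Int) : Int := pvLoopA n 25 0

-- ===== PORT B =====
-- B's digit-count loop: t //= 10; m += 1 while t > 0.
def pvDigits (t m : Int) : Int :=
  if 0 < t then pvDigits (PySem.Int.floordiv t 10) (m + 1) else m
termination_by t.toNat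
decreasing_by
  have h10 : PySem.Int.floordiv t 10 = t / 10 := PySem.Int.floordiv_eq_ediv_of_pos (by norm_num)
  omega

-- '100 ** b' is ported as (100:Int) ^ b.toNat; exact here since b ≥ 1 on this path.
def calculate_group_by_alt (n : Int) : Int :=
  if n ≤ 25 then 0
  else
    let m := pvDigits n 0
    let b0 := PySem.Int.floordiv (m + 1) 2
    let b := if PySem.Int.mod m 2 = 0 ∧ PySem.Int.floordiv (25 * ((100:Int) ^ b0.toNat - 1)) 99 < n then b0 + 1 else b0
    2 * (b - 1)

-- ===== PRECONDITION & SPEC =====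
def Spec_calculate_group_by (n : Int) (out : Int) : Prop := out = calculate_group_by_alt n
instance (n : Int) (out : Int) : Decidable (Spec_calculate_group_by n out) := by unfold Spec_calculate_group_by; infer_instance

-- ===== CLAIM (what is proved, stated in full; the proofs are below) =====
def Claim_equal_calculate_group_by : Prop := ∀ (n : Int), Dom_calculate_group_by n → Spec_calculate_group_by n (calculate_group_by n)

-- ===== LEMMAS AND PROOFS =====

-- Both programs, on |n| ≤ 2^31, compute this step function.
def pvStep (n : Int) : Int :=
  if n ≤ 25 then 0 else if n ≤ 2525 then 2 else if n ≤ 252525 then 4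
  else if n ≤ 25252525 then 6 else 8

lemma A_val (n : Int) (hn : n ≤ 2147483648) : calculate_group_by n = pvStep n := by
  unfold calculate_group_by pvStep
  by_cases h1 : n ≤ 25
  · rw [pvLoopA, if_neg (by omega), if_pos h1]
    norm_num
  by_cases h2 : n ≤ 2525
  · rw [pvLoopA, if_pos (by omega), pvLoopA, if_neg (by omega),
      if_neg h1, if_pos h2]
    norm_num
  by_cases h3 : n ≤ 252525
  · rw [pvLoopA, if_pos (by omega), pvLoopA, if_pos (by omega), pvLoopA,
      if_neg (by omega), if_neg h1, if_neg h2, if_pos h3]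
    norm_num
  by_cases h4 : n ≤ 25252525
  · rw [pvLoopA, if_pos (by omega), pvLoopA, if_pos (by omega), pvLoopA,
      if_pos (by omega), pvLoopA, if_neg (by omega),
      if_neg h1, if_neg h2, if_neg h3, if_pos h4]
    norm_num
  · rw [pvLoopA, if_pos (by omega), pvLoopA, if_pos (by omega), pvLoopA,
      if_pos (by omega), pvLoopA, if_pos (by omega), pvLoopA,
      if_neg (by omega), if_neg h1, if_neg h2, if_neg h3, if_neg h4]
    norm_num

lemma pvDigits_range (j : Nat) : ∀ t m : Int, 10 ^ j ≤ t → t < 10 ^ (j + 1) → pvDigits t m = m + j + 1 := by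
  induction j with
  | zero =>
    intro t m h1 h2
    norm_num at h1 h2
    have h0 : PySem.Int.floordiv t 10 = 0 := by
      rw [PySem.Int.floordiv_eq_ediv_of_pos (by norm_num)]; omega
    rw [pvDigits, if_pos (by omega), h0, pvDigits, if_neg (by omega)]
    norm_num
  | succ j ih =>
    intro t m h1 h2
    have ha : (0:Int) < 10 ^ (j + 1) := by positivity
    have hf : PySem.Int.floordiv t 10 = t / 10 := PySem.Int.floordiv_eq_ediv_of_pos (by norm_num)
    have hp1 : (10:Int) ^ (j + 1) = 10 ^ j * 10 := by ring
    have hp2 : (10:Int) ^ (j + 1 + 1) = 10 ^ (j + 1) * 10 := by ring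
    have hb1 : (10:Int) ^ j ≤ t / 10 := by
      have := h1; rw [hp1] at this; omega
    have hb2 : t / 10 < 10 ^ (j + 1) := by
      have := h2; rw [hp2] at this; omega
    rw [pvDigits, if_pos (by omega), hf, ih _ _ hb1 hb2]
    push_cast; ring

lemma B_val (n : Int) (hn : n ≤ 2147483648) : calculate_group_by_alt n = pvStep n := by
  unfold calculate_group_by_alt pvStep
  by_cases h1 : n ≤ 25
  · rw [if_pos h1, if_pos h1]
  rw [if_neg h1]
  by_cases d2 : n < 100
  · rw [show pvDigits n 0 = 2 from pvDigits_range 1 n 0 (by omega) (by omega)]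
    simp only [show PySem.Int.floordiv (2 + 1) 2 = 1 from by decide,
      show PySem.Int.mod 2 2 = 0 from by decide,
      show PySem.Int.floordiv (25 * ((100:Int) ^ (1:Int).toNat - 1)) 99 = 25 from by decide, true_and]
    split_ifs <;> omega
  by_cases d3 : n < 1000
  · rw [show pvDigits n 0 = 3 from pvDigits_range 2 n 0 (by omega) (by omega)]
    simp only [show PySem.Int.floordiv (3 + 1) 2 = 2 from by decide,
      show PySem.Int.mod 3 2 = 1 from by decide]
    split_ifs <;> omega
  by_cases d4 : n < 10000
  · rw [show pvDigits n 0 = 4 from pvDigits_range 3 n 0 (by omega) (by omega)]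
    simp only [show PySem.Int.floordiv (4 + 1) 2 = 2 from by decide,
      show PySem.Int.mod 4 2 = 0 from by decide,
      show PySem.Int.floordiv (25 * ((100:Int) ^ (2:Int).toNat - 1)) 99 = 2525 from by decide, true_and]
    split_ifs <;> omega
  by_cases d5 : n < 100000
  · rw [show pvDigits n 0 = 5 from pvDigits_range 4 n 0 (by omega) (by omega)]
    simp only [show PySem.Int.floordiv (5 + 1) 2 = 3 from by decide,
      show PySem.Int.mod 5 2 = 1 from by decide]
    split_ifs <;> omega
  by_cases d6 : n < 1000000
  · rw [show pvDigits n 0 = 6 from pvDigits_range 5 n 0 (by omega) (by omega)]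
    simp only [show PySem.Int.floordiv (6 + 1) 2 = 3 from by decide,
      show PySem.Int.mod 6 2 = 0 from by decide,
      show PySem.Int.floordiv (25 * ((100:Int) ^ (3:Int).toNat - 1)) 99 = 252525 from by decide, true_and]
    split_ifs <;> omega
  by_cases d7 : n < 10000000
  · rw [show pvDigits n 0 = 7 from pvDigits_range 6 n 0 (by omega) (by omega)]
    simp only [show PySem.Int.floordiv (7 + 1) 2 = 4 from by decide,
      show PySem.Int.mod 7 2 = 1 from by decide]
    split_ifs <;> omega
  by_cases d8 : n < 100000000
  · rw [show pvDigits n 0 = 8 from pvDigits_range 7 n 0 (by omega) (by omega)]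
    simp only [show PySem.Int.floordiv (8 + 1) 2 = 4 from by decide,
      show PySem.Int.mod 8 2 = 0 from by decide,
      show PySem.Int.floordiv (25 * ((100:Int) ^ (4:Int).toNat - 1)) 99 = 25252525 from by decide, true_and]
    split_ifs <;> omega
  by_cases d9 : n < 1000000000
  · rw [show pvDigits n 0 = 9 from pvDigits_range 8 n 0 (by omega) (by omega)]
    simp only [show PySem.Int.floordiv (9 + 1) 2 = 5 from by decide,
      show PySem.Int.mod 9 2 = 1 from by decide]
    split_ifs <;> omega
  · rw [show pvDigits n 0 = 10 from pvDigits_range 9 n 0 (by omega) (by omega)]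
    simp only [show PySem.Int.floordiv (10 + 1) 2 = 5 from by decide,
      show PySem.Int.mod 10 2 = 0 from by decide,
      show PySem.Int.floordiv (25 * ((100:Int) ^ (5:Int).toNat - 1)) 99 = 2525252525 from by decide, true_and]
    split_ifs <;> omega

-- ===== VERDICT (by name: the statement is the Claim_ definition above) =====
theorem calculate_group_by_spec : Claim_equal_calculate_group_by := by
  intro n hdom
  have hn : n ≤ 2147483648 := by
    simp [Dom_calculate_group_by, pvDomInt] at hdom; omega
  unfold Spec_calculate_group_by
  rw [A_val n hn, B_val n hn]
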